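-- pv_equiv track=rewrite | github.com/HiThisQ/school | programovani 1/presmycky 2.py | seznamy_slovniku
-- ===== SOURCE A (Python) =====
-- def seznamy_slovniku(slova):
--     seznam_slovniku = []
--     for slovo in slova:
--         slovnik = {}
--         for pismeno in slovo:
--             if pismeno in slovnik:
--                 slovnik[pismeno] += 1
--             else:
--                 slovnik[pismeno] = 1
--         seznam_slovniku.append(slovnik)
--     return seznam_slovniku
-- ===== SOURCE B (Python) =====
-- def seznamy_slovniku(slova):
--     seznamy = []
--     for slovo in slova:
--         pismena = list(slovo)
--         seznamy.append({p: pismena.count(p) for p in dict.fromkeys(pismena)})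
--     return seznamy
-- ===== Notes on version B (the rewrite author's own statement) =====
-- stated objective: idiomatic
-- what changed: Replaces the accumulating if/else counting loop with a dict comprehension over the distinct letters (dict.fromkeys) where each count is obtained by a .count scan.
import Mathlib
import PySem

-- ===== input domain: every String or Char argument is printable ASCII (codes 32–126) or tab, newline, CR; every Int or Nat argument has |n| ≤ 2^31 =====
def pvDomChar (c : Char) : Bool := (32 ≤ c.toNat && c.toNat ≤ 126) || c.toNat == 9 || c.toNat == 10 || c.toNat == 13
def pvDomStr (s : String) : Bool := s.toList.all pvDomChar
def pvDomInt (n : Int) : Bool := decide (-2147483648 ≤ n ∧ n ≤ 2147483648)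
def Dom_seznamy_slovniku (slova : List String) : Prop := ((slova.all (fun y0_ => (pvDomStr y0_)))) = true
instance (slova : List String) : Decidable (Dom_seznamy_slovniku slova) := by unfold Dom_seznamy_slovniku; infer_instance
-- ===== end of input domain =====

-- B replaces A's accumulating if/else counting loop with distinct letters (dict.fromkeys) + a count per letter (idiomatic).

-- ===== PORT A =====
-- inner loop: for pismeno in slovo: if pismeno in slovnik: slovnik[pismeno] += 1 else: slovnik[pismeno] = 1
def seznamy_slovniku (slova : List String) : List (List (String × Int)) :=
  slova.foldl (fun seznam slovo =>
    let slovnik : PySem.Dict String Int :=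
      slovo.toList.foldl (fun d c =>
        let p := String.singleton c
        if d.contains p then d.modify p 0 (· + 1) else d.insert p 1) PySem.Dict.empty
    seznam ++ [slovnik.items]) []

-- ===== PORT B =====
-- {p: pismena.count(p) for p in dict.fromkeys(pismena)} with pismena = list(slovo)
def seznamy_slovniku_alt (slova : List String) : List (List (String × Int)) :=
  slova.map (fun slovo =>
    let pismena := slovo.toList.map String.singleton
    (PySem.List.dedup pismena).map (fun p => (p, (pismena.count p : Int))))

-- ===== PRECONDITION & SPEC =====
def Spec_seznamy_slovniku (slova : List String) (out : List (List (String × Int))) : Prop := out = seznamy_slovniku_alt slova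
instance (slova : List String) (out : List (List (String × Int))) : Decidable (Spec_seznamy_slovniku slova out) := by unfold Spec_seznamy_slovniku; infer_instance

-- ===== CLAIM (what is proved, stated in full; the proofs are below) =====
def Claim_equal_seznamy_slovniku : Prop := ∀ (slova : List String), Dom_seznamy_slovniku slova → Spec_seznamy_slovniku slova (seznamy_slovniku slova)

-- ===== LEMMAS AND PROOFS =====

-- A's if/else counting step equals the Counter step.
theorem pv_step_eq (d : PySem.Dict String Int) (p : String) :
    (if d.contains p then d.modify p 0 (· + 1) else d.insert p 1) = d.modify p 0 (· + 1) := by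
  by_cases h : d.contains p = true
  · simp [h]
  · have h' : d.contains p = false := by simpa using h
    simp [PySem.Dict.modify, PySem.Dict.getD_of_not_contains d 0 h']

theorem pv_word_eq (slovo : String) :
    (slovo.toList.foldl (fun d c =>
      let p := String.singleton c
      if d.contains p then d.modify p 0 (· + 1) else d.insert p 1) PySem.Dict.empty).items
    = ((PySem.List.dedup (slovo.toList.map String.singleton)).map
        (fun p => (p, ((slovo.toList.map String.singleton).count p : Int)))) := by
  rw [show (fun (d : PySem.Dict String Int) (c : Char) =>
        let p := String.singleton c
        if d.contains p then d.modify p 0 (· + 1) else d.insert p 1)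
      = (fun d c => PySem.Dict.modify d (String.singleton c) 0 (· + 1)) from
      funext fun d => funext fun c => pv_step_eq d (String.singleton c)]
  rw [← List.foldl_map (f := String.singleton)
        (g := fun (d : PySem.Dict String Int) p => d.modify p 0 (· + 1)),
      ← PySem.Dict.counter_eq_foldl,
      PySem.Dict.items_counter, PySem.List.dedup_eq_ofList]

-- ===== VERDICT (by name: the statement is the Claim_ definition above) =====
theorem seznamy_slovniku_spec : Claim_equal_seznamy_slovniku := by
  intro slova _
  unfold Spec_seznamy_slovniku seznamy_slovniku seznamy_slovniku_alt
  rw [PySem.List.foldl_append_singleton_eq_map]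
  simp only [List.nil_append]
  exact List.map_congr_left (fun s _ => pv_word_eq s)
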